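-- pv_equiv track=rewrite | github.com/TValgoStudy/algo_study | 1-6주차/3주차/감자조/지수/1300_K번째수/a1.py | check
-- ===== SOURCE A (Python) =====
-- def check(N, K, n):
--     count = 0
--     for i in range(1, N + 1):
--         count += min((n - 1) // i, N)
--     if count < K:
--         return True
--     else:
--         return False
-- ===== SOURCE B (Python) =====
-- def _sum_floor_div(m, L):
--     # sum of m // i for i = 1..L, for m >= 0, grouping equal quotients (O(sqrt m))
--     s = 0
--     i = 1
--     while i <= L:
--         q = m // i
--         if q == 0:
--             break
--         j = min(L, m // q)
--         s += q * (j - i + 1)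
--         i = j + 1
--     return s
--
--
-- def check(N, K, n):
--     if N < 1:
--         return 0 < K
--     m = n - 1
--     if m < 0:
--         # m // i = -((-m - 1) // i) - 1 for i >= 1, and min(., N) never binds
--         count = -N - _sum_floor_div(-m - 1, N)
--     else:
--         t = min(N, m // N)
--         count = N * t + (_sum_floor_div(m, N) - _sum_floor_div(m, t))
--     return count < K
-- ===== Notes on version B (the rewrite author's own statement) =====
-- stated objective: faster
-- what changed: Replaces A's term-by-term loop over i = 1..N with divisor-block summation: equal floor quotients (n-1)//i are grouped into O(sqrt(n)) blocks, with the min(.,N) cap handled in closed form by splitting the range at t = min(N, (n-1)//N) and the negative n-1 case reduced to a nonnegative sum via (n-1)//i = -((-(n-1)-1)//i) - 1.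
import Mathlib
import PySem

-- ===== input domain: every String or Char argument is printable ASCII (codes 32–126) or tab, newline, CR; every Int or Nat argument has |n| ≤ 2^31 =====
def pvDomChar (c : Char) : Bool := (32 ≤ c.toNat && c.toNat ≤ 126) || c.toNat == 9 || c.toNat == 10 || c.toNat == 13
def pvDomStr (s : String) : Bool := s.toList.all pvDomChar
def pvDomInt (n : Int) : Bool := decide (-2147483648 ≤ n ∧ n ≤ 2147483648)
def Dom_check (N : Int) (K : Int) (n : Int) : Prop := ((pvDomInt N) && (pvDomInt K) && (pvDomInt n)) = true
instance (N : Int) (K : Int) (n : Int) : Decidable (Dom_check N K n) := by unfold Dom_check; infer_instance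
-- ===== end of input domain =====

-- B replaces A's O(N) term-by-term loop by divisor-block summation over equal
-- floor quotients (O(sqrt n) blocks); objective: faster.

-- ===== PORT A =====
-- count = 0; for i in range(1, N+1): count += min((n-1)//i, N); return count < K
def check (N : Int) (K : Int) (n : Int) : Bool :=
  let count := (PySem.List.pyRange 1 (N + 1) 1).foldl
    (fun count i => count + min (PySem.Int.floordiv (n - 1) i) N) 0
  if count < K then true else false

-- ===== PORT B =====
-- while-loop of _sum_floor_div, made total with a fuel counter: when the loop
-- runs (0 ≤ m), i strictly increases each pass, so L.toNat + 1 passes suffice.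
def sfdGo (m L : Int) : Nat → Int → Int → Int
  | 0, _, s => s
  | fuel + 1, i, s =>
    if i ≤ L then
      let q := PySem.Int.floordiv m i
      if q = 0 then s
      else
        let j := min L (PySem.Int.floordiv m q)
        sfdGo m L fuel (j + 1) (s + q * (j - i + 1))
    else s

def sumFloorDiv (m L : Int) : Int := sfdGo m L (L.toNat + 1) 1 0

def check_alt (N : Int) (K : Int) (n : Int) : Bool :=
  if N < 1 then decide (0 < K)
  else
    let m := n - 1
    let count :=
      if m < 0 then -N - sumFloorDiv (-m - 1) N
      else
        let t := min N (PySem.Int.floordiv m N)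
        N * t + (sumFloorDiv m N - sumFloorDiv m t)
    decide (count < K)

-- ===== PRECONDITION & SPEC =====
def Spec_check (N : Int) (K : Int) (n : Int) (out : Bool) : Prop := out = check_alt N K n
instance (N : Int) (K : Int) (n : Int) (out : Bool) : Decidable (Spec_check N K n out) := by unfold Spec_check; infer_instance

-- ===== CLAIM (what is proved, stated in full; the proofs are below) =====
def Claim_equal_check : Prop := ∀ (N : Int) (K : Int) (n : Int), Dom_check N K n → Spec_check N K n (check N K n)

-- ===== LEMMAS AND PROOFS =====

-- sum of m // k over k = a .. L (as a pyRange sum)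
def fsum (m a L : Int) : Int :=
  ((PySem.List.pyRange a (L + 1) 1).map (fun k => PySem.Int.floordiv m k)).sum

lemma fdiv_nonneg' (m k : Int) (hm : 0 ≤ m) (hk : 0 < k) :
    0 ≤ PySem.Int.floordiv m k :=
  (PySem.Int.le_floordiv_iff_mul_le hk).mpr (by simpa using hm)

-- floor division by a positive divisor is antitone in the divisor (0 ≤ m)
lemma fdiv_anti (m i k : Int) (hm : 0 ≤ m) (hi : 0 < i) (hik : i ≤ k) :
    PySem.Int.floordiv m k ≤ PySem.Int.floordiv m i := by
  have hk : 0 < k := lt_of_lt_of_le hi hik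
  by_contra h
  push Not at h
  have h1 : PySem.Int.floordiv m i + 1 ≤ PySem.Int.floordiv m k := h
  rw [PySem.Int.le_floordiv_iff_mul_le hk] at h1
  have h2 : (PySem.Int.floordiv m i + 1) * i ≤ (PySem.Int.floordiv m i + 1) * k := by
    have hq : 0 ≤ PySem.Int.floordiv m i := fdiv_nonneg' m i hm hi
    exact mul_le_mul_of_nonneg_left hik (by omega)
  have h3 : (PySem.Int.floordiv m i + 1) * i ≤ m := le_trans h2 h1
  rw [← PySem.Int.le_floordiv_iff_mul_le hi] at h3
  omega

-- the block lemma: all k in [i, m // q] share the quotient q = m // i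
lemma fdiv_block (m i k : Int) (hm : 0 ≤ m) (hi : 0 < i) (hik : i ≤ k)
    (hq : 0 < PySem.Int.floordiv m i)
    (hk2 : k ≤ PySem.Int.floordiv m (PySem.Int.floordiv m i)) :
    PySem.Int.floordiv m k = PySem.Int.floordiv m i := by
  have hkpos : 0 < k := lt_of_lt_of_le hi hik
  have hub := fdiv_anti m i k hm hi hik
  have hlb : PySem.Int.floordiv m i ≤ PySem.Int.floordiv m k := by
    rw [PySem.Int.le_floordiv_iff_mul_le hkpos]
    have := (PySem.Int.le_floordiv_iff_mul_le hq).mp hk2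
    linarith [this]
  omega

-- invariant of the fueled while loop: it adds the remaining sum Σ_{k=i}^{L} m // k
lemma sfdGo_spec (m : Int) (hm : 0 ≤ m) (L : Int) (fuel : Nat) (i s : Int)
    (hi : 0 < i) (hfuel : (L + 1 - i).toNat ≤ fuel) :
    sfdGo m L fuel i s = s + fsum m i L := by
  induction fuel generalizing i s with
  | zero =>
    have : L + 1 ≤ i := by omega
    simp [sfdGo, fsum, PySem.List.pyRange_one_eq_nil this]
  | succ fuel ih =>
    rw [sfdGo]
    by_cases hiL : i ≤ L
    · simp only [hiL, if_true]
      by_cases hq0 : PySem.Int.floordiv m i = 0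
      · -- all remaining quotients are 0
        simp only [hq0, if_true]
        have hz : ∀ k ∈ PySem.List.pyRange i (L + 1) 1,
            PySem.Int.floordiv m k = (0 : Int) := by
          intro k hk
          rw [PySem.List.mem_pyRange_one] at hk
          have h1 := fdiv_anti m i k hm hi hk.1
          have h2 := fdiv_nonneg' m k hm (lt_of_lt_of_le hi hk.1)
          omega
        unfold fsum
        rw [List.map_congr_left hz]
        simp
      · simp only [hq0, if_false]
        set q := PySem.Int.floordiv m i with hqdef
        have hqpos : 0 < q := by
          have := fdiv_nonneg' m i hm hi; omega
        set j := min L (PySem.Int.floordiv m q) with hjdef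
        have hij : i ≤ j := by
          have h1 : i ≤ PySem.Int.floordiv m q := by
            rw [PySem.Int.le_floordiv_iff_mul_le hqpos]
            have : q * i ≤ m := (PySem.Int.le_floordiv_iff_mul_le hi).mp (le_refl q)
            linarith
          omega
        have hjL : j ≤ L := by omega
        rw [ih (j + 1) _ (by omega) (by omega)]
        -- split the remaining range at j + 1 and evaluate the first block
        unfold fsum
        rw [PySem.List.pyRange_one_append i (j + 1) (L + 1) (by omega) (by omega),
            List.map_append, List.sum_append]
        have hblock : ∀ k ∈ PySem.List.pyRange i (j + 1) 1,
            PySem.Int.floordiv m k = q := by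
          intro k hk
          rw [PySem.List.mem_pyRange_one] at hk
          exact fdiv_block m i k hm hi hk.1 (by rw [← hqdef]; exact hqpos)
            (by rw [← hqdef]; omega)
        rw [List.map_congr_left hblock, PySem.List.sum_map_const_int,
            PySem.List.length_pyRange_one]
        have : ((j + 1 - i).toNat : Int) = j - i + 1 := by omega
        rw [this]; ring
    · simp only [hiL, if_false]
      have : L + 1 ≤ i := by omega
      simp [fsum, PySem.List.pyRange_one_eq_nil this]

lemma sumFloorDiv_spec (m L : Int) (hm : 0 ≤ m) :
    sumFloorDiv m L = fsum m 1 L := by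
  unfold sumFloorDiv
  rw [sfdGo_spec m hm L _ 1 0 (by omega) (by omega)]
  ring

-- pulling negation out of a list sum (no Mathlib lemma matches this map form)
lemma sum_map_neg' (xs : List Int) (f : Int → Int) :
    (xs.map (fun i => -(f i))).sum = -((xs.map f).sum) := by
  induction xs with
  | nil => simp
  | cons a l ih => simp [ih]; ring

-- A's count as a pyRange sum
lemma check_count (N K n : Int) :
    check N K n =
      decide (((PySem.List.pyRange 1 (N + 1) 1).map
        (fun i => min (PySem.Int.floordiv (n - 1) i) N)).sum < K) := by
  unfold check
  rw [PySem.List.foldl_add]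
  rw [zero_add]
  show (if _ < K then true else false) = _
  split_ifs with h
  · simp [h]
  · simp [h]

-- ===== VERDICT (by name: the statement is the Claim_ definition above) =====
theorem check_spec : Claim_equal_check := by
  intro N K n _
  unfold Spec_check
  rw [check_count]
  unfold check_alt
  by_cases hN : N < 1
  · have : N + 1 ≤ 1 := by omega
    simp [PySem.List.pyRange_one_eq_nil this, hN]
  · simp only [hN, if_false]
    push Not at hN
    set m := n - 1 with hmdef
    by_cases hmneg : m < 0
    · -- negative m: every term is m // i = -((-m-1) // i) - 1 and min never binds
      simp only [hmneg, if_true]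
      rw [sumFloorDiv_spec _ _ (by omega)]
      have hterm : ∀ i ∈ PySem.List.pyRange 1 (N + 1) 1,
          min (PySem.Int.floordiv m i) N =
            -(PySem.Int.floordiv (-m - 1) i) + (-1) := by
        intro i hi
        rw [PySem.List.mem_pyRange_one] at hi
        have hipos : (0 : Int) < i := by omega
        set r := PySem.Int.floordiv (-m - 1) i with hr
        have hrspec := (PySem.Int.floordiv_eq_iff_of_pos hipos).mp hr.symm
        have hmi : PySem.Int.floordiv m i = -r - 1 := by
          rw [PySem.Int.floordiv_eq_iff_of_pos hipos]
          constructor <;> nlinarith [hrspec.1, hrspec.2]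
        rw [hmi]
        have : -r - 1 < N := by
          have : 0 ≤ r := fdiv_nonneg' (-m - 1) i (by omega) hipos
          omega
        omega
      rw [List.map_congr_left hterm, PySem.List.sum_map_add_int]
      unfold fsum
      rw [PySem.List.sum_map_const_int, PySem.List.length_pyRange_one]
      have hlen : (((N : Int) + 1 - 1).toNat : Int) = N := by omega
      have hneg : (List.map (fun i => -PySem.Int.floordiv (-m - 1) i)
            (PySem.List.pyRange 1 (N + 1) 1)).sum =
          -(List.map (fun i => PySem.Int.floordiv (-m - 1) i)
            (PySem.List.pyRange 1 (N + 1) 1)).sum := by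
        exact sum_map_neg' _ _
      rw [hneg, hlen]
      congr 1
      ring_nf
    · -- nonnegative m: split at t = min N (m // N)
      simp only [hmneg, if_false]
      push Not at hmneg
      set t := min N (PySem.Int.floordiv m N) with htdef
      have hNpos : (0 : Int) < N := by omega
      have ht0 : 0 ≤ t := by
        have := fdiv_nonneg' m N hmneg hNpos; omega
      have htN : t ≤ N := by omega
      rw [sumFloorDiv_spec _ _ hmneg, sumFloorDiv_spec _ _ hmneg]
      rw [PySem.List.pyRange_one_append 1 (t + 1) (N + 1) (by omega) (by omega),
          List.map_append, List.sum_append]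
      have hfirst : ∀ i ∈ PySem.List.pyRange 1 (t + 1) 1,
          min (PySem.Int.floordiv m i) N = N := by
        intro i hi
        rw [PySem.List.mem_pyRange_one] at hi
        have hipos : (0 : Int) < i := hi.1
        have : N ≤ PySem.Int.floordiv m i := by
          rw [PySem.Int.le_floordiv_iff_mul_le hipos]
          have h1 : i ≤ PySem.Int.floordiv m N := by omega
          have := (PySem.Int.le_floordiv_iff_mul_le hNpos).mp h1
          linarith
        omega
      have hsecond : ∀ i ∈ PySem.List.pyRange (t + 1) (N + 1) 1,
          min (PySem.Int.floordiv m i) N = PySem.Int.floordiv m i := by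
        intro i hi
        rw [PySem.List.mem_pyRange_one] at hi
        have hipos : (0 : Int) < i := by omega
        have : PySem.Int.floordiv m i < N + 1 := by
          rw [PySem.Int.floordiv_lt_iff_lt_mul hipos]
          have hlt : PySem.Int.floordiv m N < i := by
            rcases hi with ⟨h1, _⟩
            omega
          rw [PySem.Int.floordiv_lt_iff_lt_mul hNpos] at hlt
          nlinarith
        omega
      rw [List.map_congr_left hfirst, List.map_congr_left hsecond,
          PySem.List.sum_map_const_int, PySem.List.length_pyRange_one]
      have hfs : fsum m 1 N = fsum m 1 t +
          (List.map (fun i => PySem.Int.floordiv m i)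
            (PySem.List.pyRange (t + 1) (N + 1) 1)).sum := by
        unfold fsum
        rw [PySem.List.pyRange_one_append 1 (t + 1) (N + 1) (by omega) (by omega),
            List.map_append, List.sum_append]
      have hlen : (((t : Int) + 1 - 1).toNat : Int) = t := by omega
      rw [hlen, hfs]
      ring_nf
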